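-- pv_equiv track=rewrite | github.com/cosmos/cosmos-sdk | scripts/fix-docs.py | find_range_in_new_version
-- ===== SOURCE A (Python) =====
-- def ordered_contains(old_lines, window):
--     old_idx = 0
--     for line in window:
--         if line == old_lines[old_idx]:
--             old_idx += 1
--             if old_idx == len(old_lines):
--                 return True
--     return False
--
-- def find_range_in_new_version(old_lines, new_lines):
--     max_window = len(old_lines) + 10
--     for start in range(0, len(new_lines) - len(old_lines) + 1):
--         for window_size in range(len(old_lines), max_window + 1):
--             end = start + window_size
--             if end > len(new_lines):
--                 break
--             window = [line.strip() for line in new_lines[start:end]]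
--             if ordered_contains(old_lines, window):
--                 return start + 1, end
--     return None, None
-- ===== SOURCE B (Python) =====
-- def find_range_in_new_version(old_lines, new_lines):
--     # Strip each new line once, then for each start do ONE greedy left-to-right
--     # subsequence match, which yields the minimal window end directly instead of
--     # re-stripping and re-testing every candidate window size.
--     stripped = [line.strip() for line in new_lines]
--     n = len(new_lines)
--     m = len(old_lines)
--     max_window = m + 10
--     for start in range(0, n - m + 1):
--         limit = min(n, start + max_window)
--         idx = 0
--         j = start
--         while idx < m and j < limit:
--             if stripped[j] == old_lines[idx]:
--                 idx += 1
--             j += 1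
--         if idx == m:
--             return start + 1, j
--     return None, None
-- ===== Notes on version B (the rewrite author's own statement) =====
-- stated objective: alternative
-- what changed: B strips each line once and, per start position, finds the minimal window end with a single greedy subsequence scan capped at max_window, instead of A's re-stripping and re-testing every window size from len(old) to len(old)+10.
-- outside the precondition, e.g. on find_range_in_new_version([], []): A returns (None, None), B returns (1, 0)
import Mathlib
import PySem

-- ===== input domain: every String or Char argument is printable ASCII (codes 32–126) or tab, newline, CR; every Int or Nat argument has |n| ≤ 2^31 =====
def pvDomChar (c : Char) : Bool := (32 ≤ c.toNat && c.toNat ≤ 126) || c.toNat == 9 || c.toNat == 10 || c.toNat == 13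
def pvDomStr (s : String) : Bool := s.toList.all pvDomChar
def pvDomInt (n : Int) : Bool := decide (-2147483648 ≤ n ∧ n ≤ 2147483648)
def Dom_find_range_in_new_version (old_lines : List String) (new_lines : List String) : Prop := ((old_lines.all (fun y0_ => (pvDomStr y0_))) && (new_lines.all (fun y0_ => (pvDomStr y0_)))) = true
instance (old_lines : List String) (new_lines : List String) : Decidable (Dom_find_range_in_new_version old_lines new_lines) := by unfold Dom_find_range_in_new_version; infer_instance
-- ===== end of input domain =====

-- B strips each line once and finds the minimal window end per start by ONE greedy
-- subsequence scan instead of A's re-test of every candidate window size (objective: alternative).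

-- ===== PORT A =====

-- ordered_contains' scan over the window, carrying old_idx
def pvOcGo (old_lines : List String) (old_idx : Nat) : List String → Bool
  | [] => false
  | line :: rest =>
    match PySem.List.pyGet? old_lines (old_idx : Int) with
    | none => false  -- Python raises IndexError here (only reachable when old_lines = []); excluded by Pre_
    | some s =>
      if line = s then
        if old_idx + 1 = old_lines.length then true
        else pvOcGo old_lines (old_idx + 1) rest
      else pvOcGo old_lines old_idx rest

def ordered_contains (old_lines : List String) (window : List String) : Bool :=
  pvOcGo old_lines 0 window

-- inner 'for window_size in range(len(old), max_window+1)' with break/return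
def pvInnerA (old_lines new_lines : List String) (start : Int) : List Int → Option (Option Int × Option Int)
  | [] => none
  | ws :: rest =>
    let e := start + ws
    if e > (new_lines.length : Int) then none  -- break
    else if ordered_contains old_lines ((PySem.List.slice new_lines (some start) (some e)).map PySem.Str.strip) then
      some (some (start + 1), some e)  -- return start + 1, end
    else pvInnerA old_lines new_lines start rest

-- outer 'for start in range(0, len(new) - len(old) + 1)'
def pvOuterA (old_lines new_lines : List String) : List Int → Option Int × Option Int
  | [] => (none, none)
  | start :: rest =>
    match pvInnerA old_lines new_lines start
        (PySem.List.pyRange (old_lines.length : Int) ((old_lines.length : Int) + 10 + 1) 1) with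
    | some r => r
    | none => pvOuterA old_lines new_lines rest

def find_range_in_new_version (old_lines : List String) (new_lines : List String) : Option Int × Option Int :=
  pvOuterA old_lines new_lines
    (PySem.List.pyRange 0 ((new_lines.length : Int) - (old_lines.length : Int) + 1) 1)

-- ===== PORT B =====

-- Source B's 'while idx < m and j < limit' loop; j < limit is carried as fuel = limit - j
-- (j < limit ↔ fuel > 0, and j increments exactly while fuel counts down), so the loop is
-- structural recursion the kernel can evaluate; indexing is in range by the loop condition
-- (j < limit ≤ |S|, idx < |old|), so getD transcribes stripped[j] / old_lines[idx] exactly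
def pvGreedyGo (old_lines S : List String) : Nat → Nat → Nat → Nat × Nat
  | 0, idx, j => (idx, j)
  | fuel + 1, idx, j =>
    if idx < old_lines.length then
      pvGreedyGo old_lines S fuel (if S.getD j "" = old_lines.getD idx "" then idx + 1 else idx) (j + 1)
    else (idx, j)

def pvOuterB (old_lines S : List String) (n m : Nat) : List Int → Option Int × Option Int
  | [] => (none, none)
  | start :: rest =>
    let limit := min n (start.toNat + (m + 10))
    let r := pvGreedyGo old_lines S (limit - start.toNat) 0 start.toNat
    if r.1 = m then (some (start + 1), some (r.2 : Int))
    else pvOuterB old_lines S n m rest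

def find_range_in_new_version_alt (old_lines : List String) (new_lines : List String) : Option Int × Option Int :=
  let S := new_lines.map PySem.Str.strip
  pvOuterB old_lines S new_lines.length old_lines.length
    (PySem.List.pyRange 0 ((new_lines.length : Int) - (old_lines.length : Int) + 1) 1)

-- ===== PRECONDITION & SPEC =====
-- Pre_ excludes empty old_lines: there A raises IndexError whenever new_lines is nonempty,
-- and on ([], []) its (None, None) is only an artefact of ordered_contains never succeeding
-- on an empty pattern — whether the empty sequence matches everywhere is an unspecified
-- corner; B naturally answers (1, 0) there.
def Pre_find_range_in_new_version (old_lines : List String) (new_lines : List String) : Prop :=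
  old_lines ≠ []
instance (old_lines : List String) (new_lines : List String) : Decidable (Pre_find_range_in_new_version old_lines new_lines) := by unfold Pre_find_range_in_new_version; infer_instance

def pvWitness_find_range_in_new_version : List String × List String := (["a"], ["  a", "b"])

def Spec_find_range_in_new_version (old_lines : List String) (new_lines : List String) (out : Option Int × Option Int) : Prop := out = find_range_in_new_version_alt old_lines new_lines
instance (old_lines : List String) (new_lines : List String) (out : Option Int × Option Int) : Decidable (Spec_find_range_in_new_version old_lines new_lines out) := by unfold Spec_find_range_in_new_version; infer_instance

-- ===== CLAIM (what is proved, stated in full; the proofs are below) =====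
def Claim_equal_find_range_in_new_version : Prop := ∀ (old_lines : List String) (new_lines : List String), Dom_find_range_in_new_version old_lines new_lines → Pre_find_range_in_new_version old_lines new_lines → Spec_find_range_in_new_version old_lines new_lines (find_range_in_new_version old_lines new_lines)


-- ===== LEMMAS AND PROOFS =====

-- number of window lines a greedy left-to-right match of `os` consumes (none: never completes)
def pvNeed : List String → List String → Option Nat
  | [], _ => some 0
  | _ :: _, [] => none
  | o :: os, w :: ws => (pvNeed (if w = o then os else o :: os) ws).map (· + 1)

theorem pvNeed_bounds (os ws : List String) (k : Nat) (h : pvNeed os ws = some k) :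
    os.length ≤ k ∧ k ≤ ws.length := by
  induction ws generalizing os k with
  | nil =>
    cases os with
    | nil => simp [pvNeed] at h; simp; omega
    | cons o os => simp [pvNeed] at h
  | cons w ws ih =>
    cases os with
    | nil => simp [pvNeed] at h; simp; omega
    | cons o os =>
      simp only [pvNeed, Option.map_eq_some_iff] at h
      obtain ⟨k', hk', rfl⟩ := h
      by_cases hw : w = o
      · simp [hw] at hk'
        have := ih _ _ hk'
        simp; omega
      · simp [hw] at hk'
        have := ih _ _ hk'
        simp at this ⊢; omega

theorem pvNeed_take (os ws : List String) (m k : Nat) :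
    pvNeed os (ws.take m) = some k ↔ pvNeed os ws = some k ∧ k ≤ m := by
  induction ws generalizing os m k with
  | nil =>
    cases os with
    | nil => simp [pvNeed]; omega
    | cons o os => simp [pvNeed]
  | cons w ws ih =>
    cases os with
    | nil => simp [pvNeed]; omega
    | cons o os =>
      cases m with
      | zero =>
        constructor
        · intro h; simp [pvNeed] at h
        · rintro ⟨h, hk⟩
          simp only [pvNeed, Option.map_eq_some_iff] at h
          obtain ⟨k', _, rfl⟩ := h; omega
      | succ m =>
        simp only [List.take_succ_cons, pvNeed, Option.map_eq_some_iff]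
        constructor
        · rintro ⟨k', hk', rfl⟩
          rw [ih] at hk'
          exact ⟨⟨k', hk'.1, rfl⟩, by omega⟩
        · rintro ⟨⟨k', hk', rfl⟩, hk⟩
          exact ⟨k', (ih _ _ _).2 ⟨hk', by omega⟩, rfl⟩

theorem pvOcGo_eq (old_lines : List String) (W : List String) (idx : Nat)
    (h : idx < old_lines.length) :
    pvOcGo old_lines idx W = (pvNeed (old_lines.drop idx) W).isSome := by
  induction W generalizing idx with
  | nil =>
    have hne : old_lines.drop idx ≠ [] := by
      simp [List.drop_eq_nil_iff]; omega
    cases hd : old_lines.drop idx with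
    | nil => exact absurd hd hne
    | cons o os => simp [pvOcGo, pvNeed]
  | cons l rest ih =>
    have hget : PySem.List.pyGet? old_lines (idx : Int) = some old_lines[idx] := by
      rw [PySem.List.pyGet?_natCast]; simp [h]
    have hd : old_lines.drop idx = old_lines[idx] :: old_lines.drop (idx + 1) :=
      List.drop_eq_getElem_cons h
    rw [pvOcGo, hget]
    simp only [hd, pvNeed]
    by_cases hl : l = old_lines[idx]
    · simp only [hl]
      by_cases hlen : idx + 1 = old_lines.length
      · have hnil : old_lines.drop (idx + 1) = [] := by simp [List.drop_eq_nil_iff]; omega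
        simp [hlen, pvNeed]
      · have hlt : idx + 1 < old_lines.length := by omega
        simp [hlen, ih _ hlt, Option.isSome_map]
    · simp only [if_neg hl]
      rw [ih _ h, hd]
      simp [Option.isSome_map]

theorem pvGreedy_some (old_lines S : List String) (fuel : Nat) :
    ∀ (idx j k : Nat), j + fuel ≤ S.length → idx ≤ old_lines.length →
    pvNeed (old_lines.drop idx) ((S.drop j).take fuel) = some k →
    pvGreedyGo old_lines S fuel idx j = (old_lines.length, j + k) := by
  induction fuel with
  | zero =>
    intro idx j k _ hi h
    simp only [List.take_zero] at h
    cases hd : old_lines.drop idx with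
    | nil =>
      rw [hd] at h
      simp [pvNeed] at h
      have : idx = old_lines.length := by
        have := List.drop_eq_nil_iff.mp hd; omega
      simp [pvGreedyGo, this, ← h]
    | cons o os => rw [hd] at h; simp [pvNeed] at h
  | succ fuel ih =>
    intro idx j k hjf hi h
    by_cases hidx : idx < old_lines.length
    · have hj : j < S.length := by omega
      have hdS : S.drop j = S[j] :: S.drop (j + 1) := List.drop_eq_getElem_cons hj
      have hdo : old_lines.drop idx = old_lines[idx] :: old_lines.drop (idx + 1) :=
        List.drop_eq_getElem_cons hidx
      rw [hdS, hdo, List.take_succ_cons] at h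
      simp only [pvNeed, Option.map_eq_some_iff] at h
      obtain ⟨k', hk', rfl⟩ := h
      rw [pvGreedyGo, if_pos hidx]
      rw [List.getD_eq_getElem _ _ hj, List.getD_eq_getElem _ _ hidx]
      by_cases hm : S[j] = old_lines[idx]
      · rw [if_pos hm] at hk' ⊢
        have := ih (idx + 1) (j + 1) k' (by omega) (by omega) hk'
        have harith : j + 1 + k' = j + (k' + 1) := by omega
        rw [this, harith]
      · rw [if_neg hm] at hk' ⊢
        rw [← hdo] at hk'
        have := ih idx (j + 1) k' (by omega) (by omega) hk'
        have harith : j + 1 + k' = j + (k' + 1) := by omega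
        rw [this, harith]
    · -- idx = old_lines.length, drop = [], need = some 0
      have hidxe : idx = old_lines.length := by omega
      have hnil : old_lines.drop idx = [] := by simp [List.drop_eq_nil_iff]; omega
      rw [hnil] at h
      simp [pvNeed] at h
      rw [pvGreedyGo, if_neg hidx]
      simp [hidxe, ← h]

theorem pvGreedy_none (old_lines S : List String) (fuel : Nat) :
    ∀ (idx j : Nat), j + fuel ≤ S.length → idx ≤ old_lines.length →
    pvNeed (old_lines.drop idx) ((S.drop j).take fuel) = none →
    (pvGreedyGo old_lines S fuel idx j).1 < old_lines.length := by
  induction fuel with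
  | zero =>
    intro idx j _ hi h
    simp only [List.take_zero] at h
    cases hd : old_lines.drop idx with
    | nil => rw [hd] at h; simp [pvNeed] at h
    | cons o os =>
      have : idx < old_lines.length := by
        by_contra hc
        rw [List.drop_eq_nil_iff.mpr (by omega)] at hd; simp at hd
      simpa [pvGreedyGo] using this
  | succ fuel ih =>
    intro idx j hjf hi h
    by_cases hidx : idx < old_lines.length
    · have hj : j < S.length := by omega
      have hdS : S.drop j = S[j] :: S.drop (j + 1) := List.drop_eq_getElem_cons hj
      have hdo : old_lines.drop idx = old_lines[idx] :: old_lines.drop (idx + 1) :=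
        List.drop_eq_getElem_cons hidx
      rw [hdS, hdo, List.take_succ_cons] at h
      simp only [pvNeed, Option.map_eq_none_iff] at h
      rw [pvGreedyGo, if_pos hidx]
      rw [List.getD_eq_getElem _ _ hj, List.getD_eq_getElem _ _ hidx]
      by_cases hm : S[j] = old_lines[idx]
      · rw [if_pos hm] at h ⊢
        exact ih (idx + 1) (j + 1) (by omega) (by omega) h
      · rw [if_neg hm] at h ⊢
        rw [← hdo] at h
        exact ih idx (j + 1) (by omega) (by omega) h
    · have hnil : old_lines.drop idx = [] := by simp [List.drop_eq_nil_iff]; omega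
      rw [hnil] at h
      simp [pvNeed] at h

-- the value A's inner loop yields, as a function of the greedy match length (proof helper)
def pvRes (start w nlen olen : Int) : Option Nat → Option (Option Int × Option Int)
  | some k => if max w (k : Int) ≤ olen + 10 ∧ start + max w (k : Int) ≤ nlen
              then some (some (start + 1), some (start + max w (k : Int))) else none
  | none => none

-- characterization of A's inner loop, generalized over the first remaining window size
theorem pvInnerA_char (old_lines new_lines : List String) (start : Int)
    (hold : old_lines ≠ []) (hs : 0 ≤ start) :
    ∀ (fuel : Nat) (w : Int), (old_lines.length : Int) ≤ w →
    (((old_lines.length : Int) + 10 + 1) - w).toNat ≤ fuel →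
    pvInnerA old_lines new_lines start (PySem.List.pyRange w ((old_lines.length : Int) + 10 + 1) 1) =
      pvRes start w (new_lines.length : Int) (old_lines.length : Int)
        (pvNeed old_lines ((new_lines.map PySem.Str.strip).drop start.toNat)) := by
  intro fuel
  induction fuel with
  | zero =>
    intro w hw hfuel
    have hge : (old_lines.length : Int) + 10 + 1 ≤ w := by omega
    rw [PySem.List.pyRange_one_eq_nil hge]
    cases hT : pvNeed old_lines ((new_lines.map PySem.Str.strip).drop start.toNat) with
    | none => rfl
    | some k =>
      simp only [pvInnerA, pvRes]
      rw [if_neg]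
      intro ⟨h1, _⟩
      have : w ≤ max w (k : Int) := le_max_left _ _
      omega
  | succ fuel ih =>
    intro w hw hfuel
    by_cases hlt : w < (old_lines.length : Int) + 10 + 1
    case neg =>
      rw [PySem.List.pyRange_one_eq_nil (by omega)]
      cases hT : pvNeed old_lines ((new_lines.map PySem.Str.strip).drop start.toNat) with
      | none => rfl
      | some k =>
        simp only [pvInnerA, pvRes]
        rw [if_neg]
        intro ⟨h1, _⟩
        have : w ≤ max w (k : Int) := le_max_left _ _
        omega
    case pos =>
      rw [PySem.List.pyRange_one_cons hlt]
      simp only [pvInnerA]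
      have hw0 : 0 ≤ w := by omega
      have hwin : (PySem.List.slice new_lines (some start) (some (start + w))).map PySem.Str.strip
          = ((new_lines.map PySem.Str.strip).drop start.toNat).take w.toNat := by
        rw [PySem.List.slice_toNat _ hs (by omega)]
        rw [List.map_take, List.map_drop]
        congr 1
        omega
      have hoc : ∀ W, ordered_contains old_lines W = (pvNeed old_lines W).isSome := by
        intro W
        have h0 : 0 < old_lines.length := List.length_pos_iff.mpr hold
        rw [ordered_contains, pvOcGo_eq old_lines W 0 h0, List.drop_zero]
      by_cases hbreak : start + w > (new_lines.length : Int)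
      · rw [if_pos hbreak]
        cases hT : pvNeed old_lines ((new_lines.map PySem.Str.strip).drop start.toNat) with
        | none => rfl
        | some k =>
          simp only [pvRes]
          rw [if_neg]
          intro ⟨_, h2⟩
          have : w ≤ max w (k : Int) := le_max_left _ _
          omega
      · rw [if_neg hbreak]
        rw [hwin, hoc]
        cases hT : pvNeed old_lines ((new_lines.map PySem.Str.strip).drop start.toNat) with
        | none =>
          have hnone : pvNeed old_lines (((new_lines.map PySem.Str.strip).drop start.toNat).take w.toNat) = none := by
            cases hsome : pvNeed old_lines (((new_lines.map PySem.Str.strip).drop start.toNat).take w.toNat) with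
            | none => rfl
            | some k' =>
              rw [pvNeed_take] at hsome
              rw [hsome.1] at hT; exact absurd hT (by simp)
          rw [hnone]
          simp only [Option.isSome_none, Bool.false_eq_true, if_false]
          have := ih (w + 1) (by omega) (by omega)
          rw [hT] at this
          exact this
        | some k =>
          by_cases hk : k ≤ w.toNat
          · have hsome : pvNeed old_lines (((new_lines.map PySem.Str.strip).drop start.toNat).take w.toNat) = some k :=
              (pvNeed_take _ _ _ _).mpr ⟨hT, hk⟩
            rw [hsome]
            simp only [Option.isSome_some, if_true, pvRes]
            have hmax : max w (k : Int) = w := by omega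
            rw [hmax, if_pos ⟨by omega, by omega⟩]
          · have hnone : pvNeed old_lines (((new_lines.map PySem.Str.strip).drop start.toNat).take w.toNat) = none := by
              cases hsome : pvNeed old_lines (((new_lines.map PySem.Str.strip).drop start.toNat).take w.toNat) with
              | none => rfl
              | some k' =>
                rw [pvNeed_take] at hsome
                rw [hsome.1] at hT
                have : k' = k := by injection hT
                omega
            rw [hnone]
            simp only [Option.isSome_none, Bool.false_eq_true, if_false]
            have := ih (w + 1) (by omega) (by omega)
            rw [hT] at this
            rw [this]
            simp only [pvRes]
            have hmax : max (w + 1) (k : Int) = max w (k : Int) := by omega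
            rw [hmax]

-- per-start agreement of A's inner loop with B's greedy scan
theorem pvStart_eq (old_lines new_lines : List String) (start : Int)
    (hold : old_lines ≠ []) (hs : 0 ≤ start)
    (hsn : start + (old_lines.length : Int) ≤ (new_lines.length : Int)) :
    pvInnerA old_lines new_lines start
        (PySem.List.pyRange (old_lines.length : Int) ((old_lines.length : Int) + 10 + 1) 1) =
    (if (pvGreedyGo old_lines (new_lines.map PySem.Str.strip)
          (min new_lines.length (start.toNat + (old_lines.length + 10)) - start.toNat) 0 start.toNat).1 = old_lines.length
     then some ((some (start + 1), some (((pvGreedyGo old_lines (new_lines.map PySem.Str.strip)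
          (min new_lines.length (start.toNat + (old_lines.length + 10)) - start.toNat) 0 start.toNat).2 : Nat) : Int)) : Option Int × Option Int)
     else none) := by
  rw [pvInnerA_char old_lines new_lines start hold hs 11 (old_lines.length : Int) (le_refl _) (by omega)]
  set S := new_lines.map PySem.Str.strip with hS
  have hSlen : S.length = new_lines.length := by rw [hS]; exact List.length_map _
  set s := start.toNat with hsdef
  set fuel := min new_lines.length (s + (old_lines.length + 10)) - s with hfuel
  have hslen : s ≤ new_lines.length := by omega
  have hfs : s + fuel ≤ S.length := by omega
  have hdroplen : (S.drop s).length = S.length - s := List.length_drop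
  cases hT : pvNeed old_lines (S.drop s) with
  | none =>
    have hnone : pvNeed (old_lines.drop 0) ((S.drop s).take fuel) = none := by
      rw [List.drop_zero]
      cases hsome : pvNeed old_lines ((S.drop s).take fuel) with
      | none => rfl
      | some k' =>
        rw [pvNeed_take] at hsome
        rw [hsome.1] at hT; exact absurd hT (by simp)
    have := pvGreedy_none old_lines S fuel 0 s hfs (by omega) hnone
    rw [if_neg (by omega)]
    rfl
  | some k =>
    have hb := pvNeed_bounds _ _ _ hT
    have hkT : k ≤ S.length - s := by omega
    simp only [pvRes]
    by_cases hk10 : k ≤ old_lines.length + 10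
    · have hkfuel : k ≤ fuel := by omega
      have hsome : pvNeed (old_lines.drop 0) ((S.drop s).take fuel) = some k := by
        rw [List.drop_zero]
        exact (pvNeed_take _ _ _ _).mpr ⟨hT, hkfuel⟩
      have hg := pvGreedy_some old_lines S fuel 0 s k hfs (by omega) hsome
      rw [hg]
      have hmax : max (old_lines.length : Int) (k : Int) = (k : Int) := by omega
      rw [hmax, if_pos ⟨by omega, by omega⟩, if_pos rfl]
      have hcast : start + (k : Int) = ((s + k : Nat) : Int) := by omega
      rw [hcast]
    · have hnone : pvNeed (old_lines.drop 0) ((S.drop s).take fuel) = none := by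
        rw [List.drop_zero]
        cases hsome : pvNeed old_lines ((S.drop s).take fuel) with
        | none => rfl
        | some k' =>
          rw [pvNeed_take] at hsome
          rw [hsome.1] at hT
          have : k' = k := by injection hT
          omega
      have := pvGreedy_none old_lines S fuel 0 s hfs (by omega) hnone
      have hmax : max (old_lines.length : Int) (k : Int) = (k : Int) := by omega
      rw [hmax, if_neg (by omega), if_neg (by omega)]

theorem pvOuter_eq (old_lines new_lines : List String) (hold : old_lines ≠ []) (L : List Int)
    (hL : ∀ x ∈ L, 0 ≤ x ∧ x + (old_lines.length : Int) ≤ (new_lines.length : Int)) :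
    pvOuterA old_lines new_lines L =
      pvOuterB old_lines (new_lines.map PySem.Str.strip) new_lines.length old_lines.length L := by
  induction L with
  | nil => rfl
  | cons start rest ih =>
    have hx := hL start (by simp)
    have h := pvStart_eq old_lines new_lines start hold hx.1 hx.2
    simp only [pvOuterA, pvOuterB, h]
    by_cases hc : (pvGreedyGo old_lines (new_lines.map PySem.Str.strip)
        (min new_lines.length (start.toNat + (old_lines.length + 10)) - start.toNat) 0 start.toNat).1 = old_lines.length
    · simp [hc]
    · simp only [if_neg hc]
      exact ih (fun x hxm => hL x (by simp [hxm]))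

-- ===== VERDICT (by name: the statement is the Claim_ definition above) =====
theorem find_range_in_new_version_spec : Claim_equal_find_range_in_new_version := by
  intro old_lines new_lines _ hpre
  unfold Spec_find_range_in_new_version find_range_in_new_version find_range_in_new_version_alt
  apply pvOuter_eq old_lines new_lines hpre
  intro x hx
  rw [PySem.List.mem_pyRange_one] at hx
  omega
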